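-- pv_equiv track=rewrite | github.com/JONEANDREWHARRIS/Python_with_pycharm | pass list in function.py | person
-- ===== SOURCE A (Python) =====
-- def person(lst):
--     short_name =0
--     too_big = 0
--
--     for i in lst:
--         if len(i) ==5:
--             short_name+=1
--         else:
--             too_big+=1
--
--     return short_name,too_big
-- ===== SOURCE B (Python) =====
-- def person(lst):
--     # divide and conquer: split the list in half, count each half recursively,
--     # and add the per-half (length-5, other) counts.
--     if not lst:
--         return (0, 0)
--     if len(lst) == 1:
--         return (1, 0) if len(lst[0]) == 5 else (0, 1)
--     mid = len(lst) // 2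
--     ls, lb = person(lst[:mid])
--     rs, rb = person(lst[mid:])
--     return (ls + rs, lb + rb)
-- ===== Notes on version B (the rewrite author's own statement) =====
-- stated objective: alternative
-- what changed: Replaces the single left-to-right pass with two branch-incremented counters by a divide-and-conquer recursion that splits the list in half, counts each half recursively and adds the per-half pair counts.
import Mathlib
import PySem

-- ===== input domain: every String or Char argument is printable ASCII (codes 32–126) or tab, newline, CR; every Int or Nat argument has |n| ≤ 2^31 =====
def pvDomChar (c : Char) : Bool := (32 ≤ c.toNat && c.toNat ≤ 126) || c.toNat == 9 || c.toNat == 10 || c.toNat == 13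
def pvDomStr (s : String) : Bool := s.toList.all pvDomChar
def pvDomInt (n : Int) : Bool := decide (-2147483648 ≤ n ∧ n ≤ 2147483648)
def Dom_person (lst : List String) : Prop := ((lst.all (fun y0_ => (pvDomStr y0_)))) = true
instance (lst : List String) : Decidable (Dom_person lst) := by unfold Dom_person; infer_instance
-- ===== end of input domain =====

-- B replaces A's single two-counter pass by a divide-and-conquer recursion on list halves
-- (alternative decomposition; return values proved identical).


-- ===== PORT A =====
-- for-loop over lst with two counters, branch on len(i) == 5
def person (lst : List String) : Int × Int :=
  lst.foldl (fun (st : Int × Int) i =>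
    if PySem.Str.len i == 5 then (st.1 + 1, st.2) else (st.1, st.2 + 1)) (0, 0)

-- ===== PORT B =====
-- divide and conquer: split at mid = len(lst)//2, recurse on lst[:mid] and lst[mid:], add pairs.
-- lst[0] in the singleton branch is ported as headI (the list is provably nonempty there).
def person_alt (lst : List String) : Int × Int :=
  if _h0 : lst.isEmpty then (0, 0)
  else if _h1 : lst.length = 1 then
    (if PySem.Str.len lst.headI == 5 then ((1 : Int), (0 : Int)) else (0, 1))
  else
    let mid := lst.length / 2
    let p1 := person_alt (PySem.List.slice lst none (some (mid : Int)))
    let p2 := person_alt (PySem.List.slice lst (some (mid : Int)) none)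
    (p1.1 + p2.1, p1.2 + p2.2)
termination_by lst.length
decreasing_by
  · rw [PySem.List.slice_to_natCast]
    simp only [List.isEmpty_iff, ← List.length_eq_zero_iff] at _h0
    simp only [List.length_take]
    omega
  · rw [PySem.List.slice_from_natCast]
    simp only [List.isEmpty_iff, ← List.length_eq_zero_iff] at _h0
    simp only [List.length_drop]
    omega

-- ===== PRECONDITION & SPEC =====
def Spec_person (lst : List String) (out : Int × Int) : Prop := out = person_alt lst
instance (lst : List String) (out : Int × Int) : Decidable (Spec_person lst out) := by unfold Spec_person; infer_instance

-- ===== CLAIM (what is proved, stated in full; the proofs are below) =====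
def Claim_equal_person : Prop := ∀ (lst : List String), Dom_person lst → Spec_person lst (person lst)

-- ===== LEMMAS AND PROOFS =====
-- number of length-5 strings, the common characterisation of both sides
def cnt5 (lst : List String) : Int :=
  ((lst.filter (fun s => PySem.Str.len s == 5)).length : Int)

theorem cnt5_append (xs ys : List String) : cnt5 (xs ++ ys) = cnt5 xs + cnt5 ys := by
  simp [cnt5]

theorem person_inv (lst : List String) (a b : Int) :
    lst.foldl (fun (st : Int × Int) i =>
      if PySem.Str.len i == 5 then (st.1 + 1, st.2) else (st.1, st.2 + 1)) (a, b)
    = (a + cnt5 lst, b + ((lst.length : Int) - cnt5 lst)) := by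
  induction lst generalizing a b with
  | nil => simp [cnt5]
  | cons h t ih =>
    simp only [List.foldl_cons]
    by_cases hc : (PySem.Str.len h == 5) = true
    · rw [if_pos hc, ih]
      simp only [cnt5, List.filter_cons, hc, if_pos, List.length_cons]
      rw [Prod.mk.injEq]
      constructor <;> push_cast <;> ring
    · rw [if_neg hc, ih]
      simp only [cnt5, List.filter_cons, hc]
      simp only [Bool.false_eq_true, if_false, List.length_cons]
      rw [Prod.mk.injEq]
      constructor <;> push_cast <;> ring

theorem person_alt_eq (n : ℕ) (lst : List String) (hn : lst.length ≤ n) :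
    person_alt lst = (cnt5 lst, (lst.length : Int) - cnt5 lst) := by
  induction n generalizing lst with
  | zero =>
    have : lst = [] := List.eq_nil_of_length_eq_zero (Nat.le_zero.mp hn)
    subst this
    simp [person_alt, cnt5]
  | succ m ih =>
    rw [person_alt]
    by_cases h0 : lst.isEmpty
    · rw [dif_pos h0]
      rw [List.isEmpty_iff] at h0
      subst h0; simp [cnt5]
    · rw [dif_neg h0]
      by_cases h1 : lst.length = 1
      · rw [dif_pos h1]
        obtain ⟨x, hx⟩ := List.length_eq_one_iff.mp h1
        subst hx
        by_cases hc : ((x.length : Int) = 5)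
        · simp [cnt5, hc]
        · simp [cnt5, hc]
      · rw [dif_neg h1]
        have hlen : 2 ≤ lst.length := by
          rw [List.isEmpty_iff] at h0
          have := List.length_pos_iff.mpr h0
          omega
        simp only
        rw [PySem.List.slice_to_natCast, PySem.List.slice_from_natCast]
        rw [ih _ (by simp only [List.length_take]; omega),
            ih _ (by simp only [List.length_drop]; omega)]
        have hsplit : lst.take (lst.length / 2) ++ lst.drop (lst.length / 2) = lst :=
          List.take_append_drop _ _
        have hc : cnt5 (lst.take (lst.length / 2)) + cnt5 (lst.drop (lst.length / 2)) = cnt5 lst := by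
          rw [← cnt5_append, hsplit]
        simp only [List.length_take, List.length_drop]
        have h2 : lst.length / 2 ≤ lst.length := Nat.div_le_self _ _
        rw [Prod.mk.injEq, min_eq_left h2, Nat.cast_sub h2]
        constructor
        · exact hc
        · linarith [hc]

-- ===== VERDICT (by name: the statement is the Claim_ definition above) =====
theorem person_spec : Claim_equal_person := by
  intro lst _
  show person lst = person_alt lst
  rw [person_alt_eq lst.length lst le_rfl]
  unfold person
  rw [person_inv]
  simp
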